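-- pv_equiv track=rewrite | github.com/shner-elmo/flashtext2 | flashtext2 (cython)/benchmarks/benchmark_sentence_split.py | _split_python
-- ===== SOURCE A (Python) =====
-- import string
-- from typing import Iterator
--
-- non_word_boundaries = set(string.digits + string.ascii_letters + '_')
--
-- def _split_python(sentence: str) -> Iterator[str]:
--     word = ''
--     for c in sentence:
--         if c in non_word_boundaries:
--             word += c
--         else:
--             if word:  # to avoid adding empty strings
--                 yield word
--                 word = ''
--             yield c
--     if word:  # check if there is a word that we haven't added yet
--         yield word
-- ===== SOURCE B (Python) =====
-- import string
-- from typing import Iterator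
--
-- non_word_boundaries = set(string.digits + string.ascii_letters + '_')
--
-- def _split_python(sentence: str) -> Iterator[str]:
--     # Stage 1: find every separator position; Stage 2: emit the slices between
--     # consecutive separators (the words) interleaved with the separator chars.
--     seps = [(i, c) for i, c in enumerate(sentence) if c not in non_word_boundaries]
--     prev = 0
--     for i, c in seps:
--         if prev < i:
--             yield sentence[prev:i]
--         yield c
--         prev = i + 1
--     if prev < len(sentence):
--         yield sentence[prev:]
-- ===== Notes on version B (the rewrite author's own statement) =====
-- stated objective: alternative
-- what changed: Replaces A's single-pass accumulate-and-flush loop with a two-stage delimiter-position algorithm: first collect all separator (index, char) pairs, then emit the slices of the sentence between consecutive separators interleaved with the separator chars.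
import Mathlib
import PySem

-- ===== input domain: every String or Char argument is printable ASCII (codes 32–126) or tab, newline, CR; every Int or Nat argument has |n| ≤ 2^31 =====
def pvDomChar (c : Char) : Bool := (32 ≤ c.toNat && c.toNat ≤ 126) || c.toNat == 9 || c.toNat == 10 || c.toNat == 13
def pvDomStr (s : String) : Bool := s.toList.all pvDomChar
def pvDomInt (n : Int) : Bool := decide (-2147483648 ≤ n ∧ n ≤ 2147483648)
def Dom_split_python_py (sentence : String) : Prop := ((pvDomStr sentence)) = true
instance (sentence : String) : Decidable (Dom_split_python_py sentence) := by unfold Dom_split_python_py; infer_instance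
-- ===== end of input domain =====

-- B replaces A's accumulate-and-flush loop by a two-stage algorithm (collect all separator positions, then emit slices between them, interleaved with the separator chars); objective: alternative.


-- membership in the module constant non_word_boundaries = set(digits + ascii_letters + '_'); shared by both Pythons
def isWordChar (c : Char) : Bool :=
  ('0' ≤ c && c ≤ '9') || ('a' ≤ c && c ≤ 'z') || ('A' ≤ c && c ≤ 'Z') || c == '_'

-- ===== PORT A =====
-- A's loop: accumulate word chars, flush on a separator, flush the tail at the end.
def splitAGo (word : List Char) : List Char → List String
  | [] => if word.isEmpty then [] else [String.ofList word]
  | c :: cs =>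
    if isWordChar c then
      splitAGo (word ++ [c]) cs
    else
      (if word.isEmpty then [] else [String.ofList word]) ++ String.ofList [c] :: splitAGo [] cs

def split_python_py (sentence : String) : List String :=
  splitAGo [] sentence.toList

-- ===== PORT B =====
-- B stage 2: walk the separator (index, char) list, emitting the slice sentence[prev:i]
-- when non-empty, then the separator char; finally the tail slice sentence[prev:].
def splitBEmit (cs : List Char) : Int → List (Int × Char) → List String
  | prev, [] =>
    if prev < (cs.length : Int) then [String.ofList (PySem.List.slice cs (some prev) none)] else []
  | prev, (i, c) :: rest =>
    (if prev < i then [String.ofList (PySem.List.slice cs (some prev) (some i))] else [])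
      ++ String.ofList [c] :: splitBEmit cs (i + 1) rest

-- B stage 1: seps = [(i, c) for i, c in enumerate(sentence) if c not in non_word_boundaries]
def split_python_py_alt (sentence : String) : List String :=
  splitBEmit sentence.toList 0
    ((PySem.List.enumerate sentence.toList 0).filter (fun p => !isWordChar p.2))

-- ===== PRECONDITION & SPEC =====
def Spec_split_python_py (sentence : String) (out : List String) : Prop := out = split_python_py_alt sentence
instance (sentence : String) (out : List String) : Decidable (Spec_split_python_py sentence out) := by unfold Spec_split_python_py; infer_instance

-- ===== CLAIM (what is proved, stated in full; the proofs are below) =====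
def Claim_equal_split_python_py : Prop := ∀ (sentence : String), Dom_split_python_py sentence → Spec_split_python_py sentence (split_python_py sentence)

-- ===== LEMMAS AND PROOFS =====

-- proof-only middle form: the list of maximal same-class runs (words joined, separators single)
def splitG : List Char → List String
  | [] => []
  | c :: cs =>
    if isWordChar c then
      String.ofList (c :: cs.takeWhile isWordChar) :: splitG (cs.dropWhile isWordChar)
    else
      (c :: cs.takeWhile (fun d => !isWordChar d)).map (fun d => String.ofList [d])
        ++ splitG (cs.dropWhile (fun d => !isWordChar d))
  termination_by l => l.length
  decreasing_by
    · exact Nat.lt_succ_of_le (List.length_dropWhile_le _ _)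
    · exact Nat.lt_succ_of_le (List.length_dropWhile_le _ _)

theorem splitG_word (c : Char) (cs : List Char) (h : isWordChar c = true) :
    splitG (c :: cs) =
      String.ofList (c :: cs.takeWhile isWordChar) :: splitG (cs.dropWhile isWordChar) := by
  rw [splitG.eq_def]
  simp [h]

theorem splitG_sepRun (cs : List Char) :
    (cs.takeWhile (fun d => !isWordChar d)).map (fun d => String.ofList [d])
      ++ splitG (cs.dropWhile (fun d => !isWordChar d)) = splitG cs := by
  cases cs with
  | nil => simp
  | cons d ds =>
    by_cases hd : isWordChar d
    · simp [hd]
    · simp only [Bool.not_eq_true] at hd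
      conv_rhs => rw [splitG.eq_def]
      simp [hd]

theorem splitG_sep (c : Char) (cs : List Char) (h : isWordChar c = false) :
    splitG (c :: cs) = String.ofList [c] :: splitG cs := by
  rw [splitG.eq_def]
  simp only [h, Bool.false_eq_true, if_false, List.map_cons, List.cons_append]
  rw [splitG_sepRun]

-- A equals the middle form
theorem splitAGo_eq (cs : List Char) : ∀ word : List Char,
    splitAGo word cs =
      (if word.isEmpty then [] else
        [String.ofList (word ++ cs.takeWhile isWordChar)]) ++
        splitG (if word.isEmpty then cs else cs.dropWhile isWordChar) := by
  induction cs with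
  | nil =>
    intro word
    by_cases hw : word.isEmpty
    · simp [splitAGo, splitG, hw]
    · simp [splitAGo, hw, splitG]
  | cons c cs ih =>
    intro word
    by_cases hc : isWordChar c
    · rw [splitAGo, if_pos hc, ih]
      have hne : (word ++ [c]).isEmpty = false := by simp
      by_cases hw : word.isEmpty
      · have hw' : word = [] := List.isEmpty_iff.mp hw
        subst hw'
        simp only [List.isEmpty_nil, if_true, List.nil_append]
        rw [splitG_word c cs hc]
        simp
      · simp [hw, hne, hc]
    · simp only [Bool.not_eq_true] at hc
      rw [splitAGo, if_neg (by simp [hc]), ih []]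
      by_cases hw : word.isEmpty
      · simp only [hw, if_true]
        rw [splitG_sep c cs hc]
        simp
      · simp only [hw, Bool.false_eq_true, if_false, List.dropWhile_cons, hc,
          List.takeWhile_cons]
        rw [splitG_sep c cs hc]
        simp

-- filtering separators out of an all-word-chars run yields nothing
theorem filter_enumerate_word (w : List Char) (s : Int) (hw : ∀ c ∈ w, isWordChar c = true) :
    (PySem.List.enumerate w s).filter (fun p => !isWordChar p.2) = [] := by
  rw [List.filter_eq_nil_iff]
  intro p hp
  have : p.2 ∈ w := by
    have := PySem.List.map_snd_enumerate (xs := w) (s := s)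
    exact this ▸ List.mem_map_of_mem hp
  simp [hw _ this]

-- peeling a leading all-word run w off B's stage-2 walk emits exactly the token w
theorem splitBEmit_peel (full w r : List Char) (k : Nat)
    (hdrop : full.drop k = w ++ r) (hne : w ≠ [])
    (hw : ∀ c ∈ w, isWordChar c = true)
    (hhd : ∀ d ds', r = d :: ds' → isWordChar d = false) :
    splitBEmit full (k : Int)
        ((PySem.List.enumerate (w ++ r) (k : Int)).filter (fun p => !isWordChar p.2))
      = String.ofList w ::
        splitBEmit full ((k + w.length : Nat) : Int)
          ((PySem.List.enumerate r ((k + w.length : Nat) : Int)).filter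
            (fun p => !isWordChar p.2)) := by
  have hdropk' : full.drop (k + w.length) = r := by
    have h1 : full.drop (k + w.length) = (full.drop k).drop w.length := by
      rw [List.drop_drop]
    rw [h1, hdrop, List.drop_append_of_le_length (le_refl _)]
    simp
  rw [PySem.List.enumerate_append, List.filter_append, filter_enumerate_word w _ hw,
    List.nil_append]
  have hcast : (k : Int) + (w.length : Int) = ((k + w.length : Nat) : Int) := by push_cast; ring
  rw [hcast]
  cases hr : r with
  | nil =>
    subst hr
    have hklen : k < full.length := by
      have h2 : full.length ≤ k + w.length := by
        apply List.drop_eq_nil_iff.mp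
        simpa using hdropk'
      have h3 : full.drop k ≠ [] := by rw [hdrop]; simpa using hne
      have h4 : ¬ full.length ≤ k := fun h => h3 (List.drop_eq_nil_iff.mpr h)
      omega
    have hlen2 : full.length ≤ k + w.length := by
      apply List.drop_eq_nil_iff.mp
      simpa using hdropk'
    simp only [PySem.List.enumerate_nil, List.filter_nil, splitBEmit]
    rw [if_pos (by exact_mod_cast hklen), if_neg (by push_cast; omega)]
    rw [PySem.List.slice_from_natCast, hdrop]
    simp
  | cons d ds =>
    have hd : isWordChar d = false := hhd d ds hr
    subst hr
    rw [PySem.List.enumerate_cons, List.filter_cons_of_pos (by simp [hd])]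
    simp only [splitBEmit]
    have hwpos : 0 < w.length := List.length_pos_iff.mpr hne
    rw [if_pos (by push_cast; omega), if_neg (by omega)]
    have hslice : PySem.List.slice full (some (k : Int)) (some ((k + w.length : Nat) : Int))
        = w := by
      rw [PySem.List.slice_natCast]
      have h5 : k + w.length - k = w.length := by omega
      rw [h5, hdrop, List.take_append_of_le_length (le_refl _)]
      simp
    rw [hslice]
    simp

-- peeling a leading all-separator run r off B's stage-2 walk emits its chars one by one
theorem splitBEmit_sep_peel (full : List Char) (r : List Char) (t : List Char) (k : Nat)
    (hr : ∀ c ∈ r, isWordChar c = false) :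
    splitBEmit full (k : Int)
        ((PySem.List.enumerate (r ++ t) (k : Int)).filter (fun p => !isWordChar p.2))
      = r.map (fun d => String.ofList [d]) ++
        splitBEmit full ((k + r.length : Nat) : Int)
          ((PySem.List.enumerate t ((k + r.length : Nat) : Int)).filter
            (fun p => !isWordChar p.2)) := by
  induction r generalizing k with
  | nil => simp
  | cons d r' ih =>
    have hd : isWordChar d = false := hr d (List.mem_cons_self)
    rw [List.cons_append, PySem.List.enumerate_cons,
      List.filter_cons_of_pos (by simp [hd])]
    simp only [splitBEmit]
    rw [if_neg (by omega)]
    have hcast : (k : Int) + 1 = ((k + 1 : Nat) : Int) := by push_cast; ring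
    rw [hcast, ih (k + 1) (fun c hc => hr c (List.mem_cons_of_mem _ hc))]
    have hcast2 : (k + 1 + r'.length : Nat) = (k + (d :: r').length : Nat) := by simp; omega
    rw [hcast2]
    simp

-- B equals the middle form
theorem splitBEmit_eq (cs full : List Char) (k : Nat) (hdrop : full.drop k = cs) :
    splitBEmit full (k : Int)
      ((PySem.List.enumerate cs (k : Int)).filter (fun p => !isWordChar p.2)) = splitG cs := by
  induction cs using splitG.induct generalizing k with
  | case1 =>
    have hk : full.length ≤ k := List.drop_eq_nil_iff.mp hdrop
    simp only [PySem.List.enumerate_nil, List.filter_nil, splitBEmit]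
    rw [if_neg (by omega)]
    simp [splitG]
  | case2 c cs hc ih =>
    have hsplit : c :: cs = (c :: cs.takeWhile isWordChar) ++ cs.dropWhile isWordChar := by
      simp [List.takeWhile_append_dropWhile]
    have hw : ∀ d ∈ c :: cs.takeWhile isWordChar, isWordChar d = true := by
      intro d hd
      rcases List.mem_cons.mp hd with h | h
      · subst h; exact hc
      · exact List.mem_takeWhile_imp h
    have hhd : ∀ d ds', cs.dropWhile isWordChar = d :: ds' → isWordChar d = false := by
      intro d ds' h
      have := List.head?_dropWhile_not isWordChar cs
      rw [h] at this
      simpa using this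
    have hdropfull : full.drop k = (c :: cs.takeWhile isWordChar) ++ cs.dropWhile isWordChar := by
      rw [hdrop, ← hsplit]
    have hdropk' : full.drop (k + (c :: cs.takeWhile isWordChar).length)
        = cs.dropWhile isWordChar := by
      have h1 : full.drop (k + (c :: cs.takeWhile isWordChar).length)
          = (full.drop k).drop (c :: cs.takeWhile isWordChar).length := by
        rw [List.drop_drop]
      rw [h1, hdropfull, List.drop_append_of_le_length (le_refl _)]
      simp
    conv_lhs => rw [hsplit]
    rw [splitBEmit_peel full _ _ k hdropfull (List.cons_ne_nil _ _) hw hhd]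
    rw [ih _ hdropk']
    rw [splitG_word c cs hc]
  | case3 c cs hc ih =>
    simp only [Bool.not_eq_true] at hc
    have hsplit : c :: cs
        = (c :: cs.takeWhile (fun d => !isWordChar d)) ++ cs.dropWhile (fun d => !isWordChar d) := by
      simp [List.takeWhile_append_dropWhile]
    have hr : ∀ d ∈ c :: cs.takeWhile (fun d => !isWordChar d), isWordChar d = false := by
      intro d hd
      rcases List.mem_cons.mp hd with h | h
      · subst h; exact hc
      · have := List.mem_takeWhile_imp h
        simpa using this
    have hdropk' : full.drop (k + (c :: cs.takeWhile (fun d => !isWordChar d)).length)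
        = cs.dropWhile (fun d => !isWordChar d) := by
      have h1 : full.drop (k + (c :: cs.takeWhile (fun d => !isWordChar d)).length)
          = (full.drop k).drop (c :: cs.takeWhile (fun d => !isWordChar d)).length := by
        rw [List.drop_drop]
      rw [h1, hdrop]
      conv_lhs => rw [hsplit]
      rw [List.drop_append_of_le_length (le_refl _)]
      simp
    conv_lhs => rw [hsplit]
    rw [splitBEmit_sep_peel full _ _ k hr, ih _ hdropk']
    conv_rhs => rw [splitG.eq_def]
    simp [hc]

-- ===== VERDICT (by name: the statement is the Claim_ definition above) =====
theorem split_python_py_spec : Claim_equal_split_python_py := by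
  intro s _
  show split_python_py s = split_python_py_alt s
  unfold split_python_py split_python_py_alt
  rw [splitAGo_eq]
  simp only [List.isEmpty_nil, if_true, List.nil_append]
  exact (splitBEmit_eq s.toList s.toList 0 (by simp)).symm
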